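-- pv_equiv track=rewrite | github.com/BrettRey/erdos-problem-993 | scan_round18_separator.py | tree_dp
-- ===== SOURCE A (Python) =====
-- def poly_mul(a: list[int], b: list[int]) -> list[int]:
--     if not a or not b:
--         return [0]
--     c = [0] * (len(a) + len(b) - 1)
--     for i, ai in enumerate(a):
--         if ai == 0:
--             continue
--         for j, bj in enumerate(b):
--             c[i + j] += ai * bj
--     return c
--
-- def tree_dp(adj: list[list[int]], root: int):
--     n = len(adj)
--     parent = [-1] * n
--     children = [[] for _ in range(n)]
--     order = []
--     visited = [False] * n
--     stack = [root]
--     visited[root] = True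
--     while stack:
--         v = stack.pop()
--         order.append(v)
--         for u in adj[v]:
--             if not visited[u]:
--                 visited[u] = True
--                 parent[u] = v
--                 children[v].append(u)
--                 stack.append(u)
--
--     I = [None] * n
--     E = [None] * n
--     J = [None] * n
--     for v in reversed(order):
--         if not children[v]:
--             E[v] = [1]
--             J[v] = [1]
--             I[v] = [1, 1]
--         else:
--             ev = [1]
--             jv = [1]
--             for c in children[v]:
--                 ev = poly_mul(ev, I[c])
--                 jv = poly_mul(jv, E[c])
--             E[v] = ev
--             J[v] = jv
--             deg = max(len(ev), len(jv) + 1)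
--             iv = [0] * deg
--             for i, val in enumerate(ev):
--                 iv[i] += val
--             for i, val in enumerate(jv):
--                 iv[i + 1] += val
--             I[v] = iv
--     return I, E, J, children
-- ===== SOURCE B (Python) =====
-- # B: replaces the explicit-stack while-loop by a recursive DFS (children claimed in adj
-- # order, recursion in stack-pop order) and builds I[v] by padding-and-zipping instead of
-- # two in-place add loops; the reverse-order DP pass itself is kept.
-- def poly_mul(a: list[int], b: list[int]) -> list[int]:
--     if not a or not b:
--         return [0]
--     c = [0] * (len(a) + len(b) - 1)
--     for i, ai in enumerate(a):
--         if ai == 0: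
--             continue
--         for j, bj in enumerate(b):
--             c[i + j] += ai * bj
--     return c
--
-- def tree_dp(adj: list[list[int]], root: int):
--     n = len(adj)
--     visited = [False] * n
--     children = [[] for _ in range(n)]
--     order = []
--
--     def dfs(v):
--         order.append(v)
--         kids = []
--         for u in adj[v]:
--             if not visited[u]:
--                 visited[u] = True
--                 kids.append(u)
--         children[v] = kids
--         for u in reversed(kids):
--             dfs(u)
--
--     visited[root] = True
--     dfs(root)
--
--     I = [None] * n
--     E = [None] * n
--     J = [None] * n
--     for v in reversed(order):
--         kids = children[v]
--         if not kids:
--             E[v] = [1]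
--             J[v] = [1]
--             I[v] = [1, 1]
--         else:
--             ev = [1]
--             jv = [1]
--             for c in kids:
--                 ev = poly_mul(ev, I[c])
--                 jv = poly_mul(jv, E[c])
--             E[v] = ev
--             J[v] = jv
--             deg = max(len(ev), len(jv) + 1)
--             pe = ev + [0] * (deg - len(ev))
--             pj = [0] + jv + [0] * (deg - 1 - len(jv))
--             I[v] = [x + y for x, y in zip(pe, pj)]
--     return I, E, J, children
-- ===== Notes on version B (the rewrite author's own statement) =====
-- stated objective: alternative
-- what changed: The explicit stack/while traversal (with pushes, pops and a separate visited-driven loop) is replaced by a recursive DFS that claims children and recurses, and the two in-place index-offset add loops building I[v] are replaced by a pad-and-zip elementwise sum; the reverse-order DP pass over the traversal order is kept.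
import Mathlib
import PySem

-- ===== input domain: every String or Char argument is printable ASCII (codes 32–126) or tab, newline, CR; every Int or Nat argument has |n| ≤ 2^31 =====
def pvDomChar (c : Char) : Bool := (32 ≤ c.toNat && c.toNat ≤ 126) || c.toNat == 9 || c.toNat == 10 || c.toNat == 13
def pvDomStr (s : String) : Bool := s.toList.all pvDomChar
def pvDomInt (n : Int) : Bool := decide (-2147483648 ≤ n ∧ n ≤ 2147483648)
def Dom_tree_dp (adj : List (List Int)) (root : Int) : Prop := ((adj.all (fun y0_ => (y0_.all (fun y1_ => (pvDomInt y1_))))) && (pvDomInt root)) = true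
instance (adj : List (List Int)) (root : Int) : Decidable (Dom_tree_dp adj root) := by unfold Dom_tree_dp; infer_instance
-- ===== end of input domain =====

-- B replaces the explicit-stack while-loop by a recursive DFS and the two in-place add
-- loops building I[v] by a pad-and-zip sum; the reverse-order DP pass is kept.
-- A mutates nothing observable; equivalence is about the return value.

-- ===== PORT A =====
-- shared primitive reads/writes ("xs[i]" / "xs[i] = v" with Python's negative-index
-- wraparound; the guards only totalise them — Pre_ keeps every index inside [-n, n))
def pynorm (n : Nat) (u : Int) : Int := if u < 0 then u + n else u
def visAt (vis : List Bool) (u : Int) : Bool :=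
  if 0 ≤ pynorm vis.length u then vis.getD (pynorm vis.length u).toNat true else true
def bset (vis : List Bool) (u : Int) : List Bool :=
  if 0 ≤ pynorm vis.length u then vis.set (pynorm vis.length u).toNat true else vis
def iset (l : List Int) (u : Int) (x : Int) : List Int :=
  if 0 ≤ pynorm l.length u then l.set (pynorm l.length u).toNat x else l
def tget (t : List (List Int)) (v : Int) : List Int :=
  if 0 ≤ pynorm t.length v then t.getD (pynorm t.length v).toNat [] else []
def tset (t : List (List Int)) (v : Int) (x : List Int) : List (List Int) :=
  if 0 ≤ pynorm t.length v then t.set (pynorm t.length v).toNat x else t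
def nbrs (adj : List (List Int)) (v : Int) : List Int :=
  if 0 ≤ pynorm adj.length v then adj.getD (pynorm adj.length v).toNat [] else []
def cntF (vis : List Bool) : Nat := vis.count false

-- poly_mul, shared verbatim by A and B ("Keep poly_mul unchanged")
def mulInner (ai : Int) : List Int → Nat → List Int → List Int
  | [], _, c => c
  | bj :: bs, k, c => mulInner ai bs (k + 1) (c.set k (c.getD k 0 + ai * bj))

def mulOuter (b : List Int) : List Int → Nat → List Int → List Int
  | [], _, c => c
  | ai :: as_, i, c => mulOuter b as_ (i + 1) (if ai = 0 then c else mulInner ai b i c)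

def polyMul (a b : List Int) : List Int :=
  if a = [] ∨ b = [] then [0]
  else mulOuter b a 0 (List.replicate (a.length + b.length - 1) 0)

-- "iv[i+off] += val" loops of A's phase 2
def addInto : List Int → List Int → Nat → List Int
  | c, [], _ => c
  | c, x :: xs, k => addInto (c.set k (c.getD k 0 + x)) xs (k + 1)

structure StA where
  vis : List Bool
  par : List Int
  ch : List (List Int)
  ord : List Int
  stk : List Int

-- the inner "for u in adj[v]" of A's while loop
def claimA (v : Int) : List Int → StA → StA
  | [], s => s
  | u :: us, s =>
      claimA v us
        (if visAt s.vis u = false then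
          ⟨bset s.vis u, iset s.par u v, tset s.ch v (tget s.ch v ++ [u]), s.ord, u :: s.stk⟩
        else s)

theorem count_false_set_true : ∀ (l : List Bool) (i : Nat), l.getD i true = false →
    (l.set i true).count false + 1 = l.count false
  | [], i, h => by simp [List.getD] at h
  | b :: l, 0, h => by
      rw [List.getD_cons_zero] at h
      subst h
      simp
  | b :: l, i + 1, h => by
      rw [List.getD_cons_succ] at h
      have := count_false_set_true l i h
      simp only [List.set, List.count_cons]
      omega

theorem cntF_bset (vis : List Bool) (u : Int) (h : visAt vis u = false) :
    cntF (bset vis u) + 1 = cntF vis := by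
  unfold visAt at h
  by_cases h0 : 0 ≤ pynorm vis.length u
  · rw [if_pos h0] at h
    unfold bset cntF
    rw [if_pos h0]
    exact count_false_set_true vis (pynorm vis.length u).toNat h
  · rw [if_neg h0] at h; cases h

theorem claimA_measure (v : Int) (us : List Int) (s : StA) :
    2 * cntF (claimA v us s).vis + (claimA v us s).stk.length ≤ 2 * cntF s.vis + s.stk.length := by
  induction us generalizing s with
  | nil => exact Nat.le_refl _
  | cons u us ih =>
    simp only [claimA]
    by_cases h : visAt s.vis u = false
    · rw [if_pos h]
      refine (ih _).trans ?_
      have h2 := cntF_bset s.vis u h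
      simp only [List.length_cons]
      omega
    · rw [if_neg h]
      exact ih s

-- A's while loop (stack top at the head; Python pushes/pops at the list end)
def loopA (adj : List (List Int)) (s : StA) : StA :=
  match h : s.stk with
  | [] => s
  | v :: rest => loopA adj (claimA v (nbrs adj v) { s with ord := s.ord ++ [v], stk := rest })
termination_by 2 * cntF s.vis + s.stk.length
decreasing_by
  have := claimA_measure v (nbrs adj v) { s with ord := s.ord ++ [v], stk := rest }
  simp only at this ⊢
  have hl : s.stk.length = rest.length + 1 := by rw [h]; rfl
  omega

-- the body of A's "for v in reversed(order)" pass
def step2A (ch : List (List Int))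
    (t : List (List Int) × List (List Int) × List (List Int)) (v : Int) :
    List (List Int) × List (List Int) × List (List Int) :=
  let cs := tget ch v
  if cs = [] then (tset t.1 v [1, 1], tset t.2.1 v [1], tset t.2.2 v [1])
  else
    let p := cs.foldl (fun (p : List Int × List Int) c =>
      (polyMul p.1 (tget t.1 c), polyMul p.2 (tget t.2.1 c))) ([1], [1])
    let deg := max p.1.length (p.2.length + 1)
    let iv := addInto (addInto (List.replicate deg 0) p.1 0) p.2 1
    (tset t.1 v iv, tset t.2.1 v p.1, tset t.2.2 v p.2)

def tree_dp (adj : List (List Int)) (root : Int) :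
    List (List Int) × List (List Int) × List (List Int) × List (List Int) :=
  let n := adj.length
  let r := loopA adj ⟨bset (List.replicate n false) root, List.replicate n (-1),
    List.replicate n [], [], [root]⟩
  let t := r.ord.reverse.foldl (step2A r.ch)
    (List.replicate n [], List.replicate n [], List.replicate n [])
  (t.1, t.2.1, t.2.2, r.ch)

-- ===== PORT B =====
structure StB where
  vis : List Bool
  ch : List (List Int)
  ord : List Int

-- "kids = [...claim unvisited neighbours...]" of B's dfs
def claimB : List Int → List Bool × List Int → List Bool × List Int
  | [], p => p
  | u :: us, p => claimB us (if visAt p.1 u = false then (bset p.1 u, p.2 ++ [u]) else p)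

-- B's recursive dfs (fuel only totalises it; n+1 is always enough)
def dfsB (adj : List (List Int)) : Nat → Int → StB → StB
  | 0, _, s => s
  | f + 1, v, s =>
      let p := claimB (nbrs adj v) (s.vis, [])
      let s1 : StB := ⟨p.1, tset s.ch v p.2, s.ord ++ [v]⟩
      p.2.reverse.foldl (fun s u => dfsB adj f u s) s1

-- the body of B's "for v in reversed(order)" pass (pad-and-zip combine)
def step2B (ch : List (List Int))
    (t : List (List Int) × List (List Int) × List (List Int)) (v : Int) :
    List (List Int) × List (List Int) × List (List Int) :=
  let cs := tget ch v
  if cs = [] then (tset t.1 v [1, 1], tset t.2.1 v [1], tset t.2.2 v [1])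
  else
    let p := cs.foldl (fun (p : List Int × List Int) c =>
      (polyMul p.1 (tget t.1 c), polyMul p.2 (tget t.2.1 c))) ([1], [1])
    let deg := max p.1.length (p.2.length + 1)
    let iv := List.zipWith (· + ·) (p.1 ++ List.replicate (deg - p.1.length) 0)
      (0 :: (p.2 ++ List.replicate (deg - 1 - p.2.length) 0))
    (tset t.1 v iv, tset t.2.1 v p.1, tset t.2.2 v p.2)

def tree_dp_alt (adj : List (List Int)) (root : Int) :
    List (List Int) × List (List Int) × List (List Int) × List (List Int) :=
  let n := adj.length
  let r := dfsB adj (n + 1) root ⟨bset (List.replicate n false) root, List.replicate n [], []⟩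
  let t := r.ord.reverse.foldl (step2B r.ch)
    (List.replicate n [], List.replicate n [], List.replicate n [])
  (t.1, t.2.1, t.2.2, r.ch)

-- ===== PRECONDITION & SPEC =====
-- Pre_ excludes inputs on which Python A raises (root or an adjacency entry outside
-- [-n, n)) and, as a defensible-corner artefact, one kind A still returns on: graphs
-- whose nodes are not all reachable from root, where A returns None entries — not
-- values of the declared list-of-int-lists type.
def reachClose (adj : List (List Int)) (root : Int) : List Int :=
  (fun s : List Int =>
    (s.flatMap (fun v => v :: (nbrs adj v).map (pynorm adj.length))).dedup)^[adj.length]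
    [pynorm adj.length root]

def Pre_tree_dp (adj : List (List Int)) (root : Int) : Prop :=
  -(adj.length : Int) ≤ root ∧ root < adj.length ∧
  (∀ l ∈ adj, ∀ u ∈ l, -(adj.length : Int) ≤ u ∧ u < adj.length) ∧
  (∀ k : Nat, k < adj.length → (k : Int) ∈ reachClose adj root)

instance (adj : List (List Int)) (root : Int) : Decidable (Pre_tree_dp adj root) := by
  unfold Pre_tree_dp; infer_instance

def pvWitness_tree_dp : List (List Int) × Int := ([[1, 2], [0], [0]], 0)

def Spec_tree_dp (adj : List (List Int)) (root : Int)
    (out : List (List Int) × List (List Int) × List (List Int) × List (List Int)) : Prop :=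
  out = tree_dp_alt adj root

instance (adj : List (List Int)) (root : Int)
    (out : List (List Int) × List (List Int) × List (List Int) × List (List Int)) :
    Decidable (Spec_tree_dp adj root out) := by unfold Spec_tree_dp; infer_instance

-- ===== CLAIM (what is proved, stated in full; the proofs are below) =====
def Claim_equal_tree_dp : Prop := ∀ (adj : List (List Int)) (root : Int),
  Dom_tree_dp adj root → Pre_tree_dp adj root → Spec_tree_dp adj root (tree_dp adj root)

-- ===== LEMMAS AND PROOFS =====

-- basic getD/set facts
theorem getD_set_ite {α : Type} (d : α) (l : List α) (i j : Nat) (x : α) :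
    (l.set i x).getD j d = if i = j ∧ i < l.length then x else l.getD j d := by
  simp only [List.getD_eq_getElem?_getD, List.getElem?_set]
  by_cases hij : i = j
  · subst hij
    by_cases hlt : i < l.length <;> simp [hlt]
  · simp [hij]

theorem set_of_getD {α : Type} (d : α) (l : List α) (i : Nat) (x : α)
    (h : l.getD i d = x) : l.set i x = l := by
  by_cases hl : i < l.length
  · apply List.ext_getElem (by simp)
    intro n h1 h2
    rw [List.getElem_set]
    split
    · next hn => subst hn; rw [← List.getD_eq_getElem l d hl, h]
    · rfl
  · exact List.set_eq_of_length_le (Nat.le_of_not_lt hl)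

theorem visAt_false_elim (vis : List Bool) (u : Int) (h : visAt vis u = false) :
    0 ≤ pynorm vis.length u ∧ (pynorm vis.length u).toNat < vis.length ∧
      vis.getD (pynorm vis.length u).toNat true = false := by
  unfold visAt at h
  by_cases h0 : 0 ≤ pynorm vis.length u
  · rw [if_pos h0] at h
    by_cases hlt : (pynorm vis.length u).toNat < vis.length
    · exact ⟨h0, hlt, h⟩
    · rw [List.getD_eq_default _ _ (Nat.le_of_not_lt hlt)] at h; cases h
  · rw [if_neg h0] at h; cases h

theorem pynorm_inj (n : Nat) (v w : Int) (hv : 0 ≤ pynorm n v) (hw : 0 ≤ pynorm n w)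
    (h : (pynorm n v).toNat = (pynorm n w).toNat) : pynorm n v = pynorm n w := by
  rw [← Int.toNat_of_nonneg hv, ← Int.toNat_of_nonneg hw, h]

theorem visAt_congr (vis : List Bool) (v w : Int)
    (h : pynorm vis.length v = pynorm vis.length w) : visAt vis v = visAt vis w := by
  unfold visAt; rw [h]

theorem bset_length (vis : List Bool) (u : Int) : (bset vis u).length = vis.length := by
  unfold bset; split <;> simp

theorem tset_length (t : List (List Int)) (v : Int) (x : List Int) :
    (tset t v x).length = t.length := by
  unfold tset; split <;> simp

theorem visAt_bset_self (vis : List Bool) (u : Int) (h0 : 0 ≤ pynorm vis.length u)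
    (hlt : (pynorm vis.length u).toNat < vis.length) : visAt (bset vis u) u = true := by
  unfold visAt bset
  rw [if_pos h0]
  simp only [List.length_set]
  rw [if_pos h0, getD_set_ite]
  simp [hlt]

theorem visAt_bset_true (vis : List Bool) (u w : Int) (h : visAt vis w = true) :
    visAt (bset vis u) w = true := by
  unfold visAt bset at *
  by_cases hu : 0 ≤ pynorm vis.length u
  · rw [if_pos hu]
    simp only [List.length_set]
    by_cases hw : 0 ≤ pynorm vis.length w
    · rw [if_pos hw] at h ⊢
      rw [getD_set_ite]
      split
      · rfl
      · exact h
    · rw [if_neg hw]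
  · rw [if_neg hu]; exact h

theorem visAt_false_of_bset (vis : List Bool) (u w : Int)
    (h : visAt (bset vis u) w = false) : visAt vis w = false := by
  cases hv : visAt vis w
  · rfl
  · rw [visAt_bset_true vis u w hv] at h; cases h

theorem tget_replicate (n : Nat) (w : Int) : tget (List.replicate n []) w = [] := by
  unfold tget
  simp only [List.length_replicate]
  split
  · by_cases h : (pynorm n w).toNat < n
    · rw [List.getD_replicate _ h]
    · rw [List.getD_eq_default _ _ (by simpa using Nat.le_of_not_lt h)]
  · rfl

theorem visAt_out (vis : List Bool) (u : Int) (h : ¬ (pynorm vis.length u).toNat < vis.length) :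
    visAt vis u = true := by
  unfold visAt
  split
  · rw [List.getD_eq_default _ _ (Nat.le_of_not_lt h)]
  · rfl

-- claimB: accumulator, lengths, monotonicity, counting, claimed-kids spec
theorem claimB_acc : ∀ (us : List Int) (vis : List Bool) (ks : List Int),
    claimB us (vis, ks) = ((claimB us (vis, [])).1, ks ++ (claimB us (vis, [])).2) := by
  intro us
  induction us with
  | nil => intro vis ks; simp [claimB]
  | cons u us ih =>
    intro vis ks
    simp only [claimB]
    by_cases h : visAt vis u = false
    · rw [if_pos h, if_pos h]
      simp only [List.nil_append]
      rw [ih (bset vis u) (ks ++ [u]), ih (bset vis u) [u]]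
      simp
    · rw [if_neg h, if_neg h]
      exact ih vis ks

theorem claimB_vis_length : ∀ (us : List Int) (vis : List Bool) (ks : List Int),
    (claimB us (vis, ks)).1.length = vis.length := by
  intro us
  induction us with
  | nil => intro vis ks; simp [claimB]
  | cons u us ih =>
    intro vis ks
    simp only [claimB]
    by_cases h : visAt vis u = false
    · rw [if_pos h, ih, bset_length]
    · rw [if_neg h, ih]

theorem claimB_vis_mono : ∀ (us : List Int) (vis : List Bool) (ks : List Int) (w : Int),
    visAt vis w = true → visAt (claimB us (vis, ks)).1 w = true := by
  intro us
  induction us with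
  | nil => intro vis ks w h; simpa [claimB] using h
  | cons u us ih =>
    intro vis ks w h
    simp only [claimB]
    by_cases hc : visAt vis u = false
    · rw [if_pos hc]; exact ih _ _ _ (visAt_bset_true vis u w h)
    · rw [if_neg hc]; exact ih _ _ _ h

theorem visAt_false_claimB (us : List Int) (vis : List Bool) (ks : List Int) (w : Int)
    (h : visAt (claimB us (vis, ks)).1 w = false) : visAt vis w = false := by
  cases hv : visAt vis w
  · rfl
  · rw [claimB_vis_mono us vis ks w hv] at h; cases h

theorem claimB_cnt : ∀ (us : List Int) (vis : List Bool) (ks : List Int),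
    cntF (claimB us (vis, ks)).1 + (claimB us (vis, ks)).2.length = cntF vis + ks.length := by
  intro us
  induction us with
  | nil => intro vis ks; simp [claimB]
  | cons u us ih =>
    intro vis ks
    simp only [claimB]
    by_cases h : visAt vis u = false
    · rw [if_pos h]
      have h1 := ih (bset vis u) (ks ++ [u])
      have h2 := cntF_bset vis u h
      simp only [List.length_append, List.length_cons, List.length_nil] at h1 ⊢
      omega
    · rw [if_neg h]; exact ih vis ks

theorem claimB_kids_spec : ∀ (us : List Int) (vis : List Bool),
    (∀ u ∈ (claimB us (vis, [])).2,
      0 ≤ pynorm vis.length u ∧ (pynorm vis.length u).toNat < vis.length ∧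
        visAt vis u = false ∧ visAt (claimB us (vis, [])).1 u = true) ∧
    (claimB us (vis, [])).2.Pairwise (fun a b => pynorm vis.length a ≠ pynorm vis.length b) := by
  intro us
  induction us with
  | nil => intro vis; simp [claimB]
  | cons u us ih =>
    intro vis
    simp only [claimB]
    by_cases h : visAt vis u = false
    · rw [if_pos h]
      simp only [List.nil_append]
      rw [claimB_acc us (bset vis u) [u]]
      obtain ⟨ih1, ih2⟩ := ih (bset vis u)
      obtain ⟨h0, hlt, hgd⟩ := visAt_false_elim vis u h
      have hself : visAt (bset vis u) u = true := visAt_bset_self vis u h0 hlt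
      constructor
      · intro w hw
        rcases List.mem_append.1 hw with hw1 | hw2
        · rw [List.mem_singleton] at hw1
          subst hw1
          exact ⟨h0, hlt, h, claimB_vis_mono us _ _ _ hself⟩
        · obtain ⟨w0, wlt, wfalse, wtrue⟩ := ih1 w hw2
          rw [bset_length] at w0 wlt
          exact ⟨w0, wlt, visAt_false_of_bset vis u w wfalse, wtrue⟩
      · rw [List.singleton_append, List.pairwise_cons]
        constructor
        · intro w hw hequ
          obtain ⟨_, _, wfalse, _⟩ := ih1 w hw
          have : visAt (bset vis u) u = visAt (bset vis u) w := by
            apply visAt_congr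
            rw [bset_length]
            exact hequ
          rw [← this, hself] at wfalse
          cases wfalse
        · refine ih2.imp ?_
          intro a b hab
          rw [bset_length] at hab
          exact hab
    · rw [if_neg h]; exact ih vis
-- claimA vs claimB: same marking, pushed kids in reverse on the stack, order untouched
theorem claimA_proj : ∀ (us : List Int) (v : Int) (s : StA),
    (claimA v us s).vis = (claimB us (s.vis, [])).1 ∧
    (claimA v us s).stk = (claimB us (s.vis, [])).2.reverse ++ s.stk ∧
    (claimA v us s).ord = s.ord := by
  intro us
  induction us with
  | nil => intro v s; simp [claimA, claimB]
  | cons u us ih =>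
    intro v s
    simp only [claimA, claimB]
    by_cases h : visAt s.vis u = false
    · rw [if_pos h, if_pos h]
      simp only [List.nil_append]
      obtain ⟨h1, h2, h3⟩ := ih v ⟨bset s.vis u, iset s.par u v,
        tset s.ch v (tget s.ch v ++ [u]), s.ord, u :: s.stk⟩
      rw [claimB_acc us (bset s.vis u) [u]]
      simp only at h1 h2 h3
      refine ⟨h1, ?_, h3⟩
      rw [h2]
      simp
    · rw [if_neg h, if_neg h]
      exact ih v s

theorem tset_neg (t : List (List Int)) (v : Int) (x : List Int) (h : ¬ 0 ≤ pynorm t.length v) :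
    tset t v x = t := by unfold tset; rw [if_neg h]

theorem tset_tset (t : List (List Int)) (v : Int) (x y : List Int) :
    tset (tset t v x) v y = tset t v y := by
  unfold tset
  by_cases h : 0 ≤ pynorm t.length v
  · rw [if_pos h]
    simp only [List.length_set]
    rw [if_pos h, if_pos h, List.set_set]
  · rw [if_neg h, if_neg h]

theorem tget_tset_self (t : List (List Int)) (v : Int) (x : List Int)
    (h0 : 0 ≤ pynorm t.length v) (hlt : (pynorm t.length v).toNat < t.length) :
    tget (tset t v x) v = x := by
  unfold tget tset
  rw [if_pos h0]
  simp only [List.length_set]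
  rw [if_pos h0, getD_set_ite, if_pos ⟨rfl, hlt⟩]

theorem tset_oob (t : List (List Int)) (v : Int) (x : List Int)
    (h : ¬ (pynorm t.length v).toNat < t.length) : tset t v x = t := by
  unfold tset
  split
  · exact List.set_eq_of_length_le (Nat.le_of_not_lt h)
  · rfl

theorem tget_tset_other (t : List (List Int)) (v w : Int) (x : List Int)
    (hv : 0 ≤ pynorm t.length v) (hw : 0 ≤ pynorm t.length w)
    (hne : ¬ ((pynorm t.length v).toNat = (pynorm t.length w).toNat ∧
      (pynorm t.length v).toNat < t.length)) :
    tget (tset t v x) w = tget t w := by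
  unfold tget tset
  rw [if_pos hv]
  simp only [List.length_set]
  rw [if_pos hw, if_pos hw, getD_set_ite, if_neg hne]

theorem tget_tset_neg_w (t : List (List Int)) (v w : Int) (x : List Int)
    (hw : ¬ 0 ≤ pynorm t.length w) : tget (tset t v x) w = [] := by
  unfold tget tset
  split
  · simp only [List.length_set]
    rw [if_neg hw]
  · rfl

theorem claimA_ch : ∀ (us : List Int) (v : Int) (s : StA),
    (claimA v us s).ch = tset s.ch v (tget s.ch v ++ (claimB us (s.vis, [])).2) := by
  intro us
  induction us with
  | nil =>
    intro v s
    simp only [claimA, claimB, List.append_nil]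
    unfold tset tget
    split
    · exact (set_of_getD [] s.ch (pynorm s.ch.length v).toNat _ rfl).symm
    · rfl
  | cons u us ih =>
    intro v s
    simp only [claimA, claimB]
    by_cases h : visAt s.vis u = false
    · rw [if_pos h, if_pos h]
      simp only [List.nil_append]
      rw [claimB_acc us (bset s.vis u) [u]]
      have hih := ih v ⟨bset s.vis u, iset s.par u v,
        tset s.ch v (tget s.ch v ++ [u]), s.ord, u :: s.stk⟩
      simp only at hih
      rw [hih, tset_tset]
      by_cases hlt : (pynorm s.ch.length v).toNat < s.ch.length
      · by_cases hv : 0 ≤ pynorm s.ch.length v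
        · rw [tget_tset_self s.ch v _ hv hlt, List.append_assoc]
        · rw [tset_neg _ _ _ hv, tset_neg _ _ _ hv]
      · have e1 : tset s.ch v (tget s.ch v ++ [u]) = s.ch := tset_oob _ _ _ hlt
        rw [e1, tset_oob _ _ _ hlt, tset_oob _ _ _ hlt]
    · rw [if_neg h, if_neg h]
      exact ih v s

-- dfsB: count of unvisited never grows; fuel is irrelevant once it exceeds that count
theorem dfsB_cnt (adj : List (List Int)) : ∀ (f : Nat) (v : Int) (s : StB),
    cntF (dfsB adj f v s).vis ≤ cntF s.vis := by
  intro f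
  induction f with
  | zero => intro v s; exact Nat.le_refl _
  | succ f ih =>
    intro v s
    simp only [dfsB]
    have fold : ∀ (ls : List Int) (t : StB),
        cntF ((ls.foldl (fun s u => dfsB adj f u s)) t).vis ≤ cntF t.vis := by
      intro ls
      induction ls with
      | nil => intro t; exact Nat.le_refl _
      | cons x xs ihx =>
        intro t
        simp only [List.foldl_cons]
        exact (ihx _).trans (ih x t)
    refine (fold _ _).trans ?_
    show cntF (claimB (nbrs adj v) (s.vis, [])).1 ≤ cntF s.vis
    have := claimB_cnt (nbrs adj v) s.vis []
    simp only [List.length_nil, Nat.add_zero] at this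
    omega

theorem claimB_pos_of_ne_nil (us : List Int) (vis : List Bool)
    (h : (claimB us (vis, [])).2 ≠ []) : 1 ≤ cntF vis := by
  have := claimB_cnt us vis []
  simp only [List.length_nil, Nat.add_zero] at this
  have : (claimB us (vis, [])).2.length ≠ 0 := fun hh => h (List.eq_nil_of_length_eq_zero hh)
  omega

theorem foldl_dfsB_fuel (adj : List (List Int)) : ∀ (f : Nat) (g : Nat) (ls : List Int) (t : StB),
    cntF t.vis < f → cntF t.vis < g →
    (∀ (v : Int) (s : StB), cntF s.vis < f → cntF s.vis < g → dfsB adj f v s = dfsB adj g v s) →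
    ls.foldl (fun s u => dfsB adj f u s) t = ls.foldl (fun s u => dfsB adj g u s) t := by
  intro f g ls
  induction ls with
  | nil => intro t _ _ _; rfl
  | cons x xs ihx =>
    intro t hf hg hirr
    simp only [List.foldl_cons]
    rw [← hirr x t hf hg]
    exact ihx (dfsB adj f x t) (Nat.lt_of_le_of_lt (dfsB_cnt adj f x t) hf)
      (Nat.lt_of_le_of_lt (dfsB_cnt adj f x t) hg) hirr

theorem dfsB_fuel_irrel (adj : List (List Int)) : ∀ (f g : Nat) (v : Int) (s : StB),
    cntF s.vis < f → cntF s.vis < g → dfsB adj f v s = dfsB adj g v s := by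
  intro f
  induction f with
  | zero => intro g v s hf _; omega
  | succ f ihf =>
    intro g v s hf hg
    cases g with
    | zero => omega
    | succ g =>
      simp only [dfsB]
      by_cases hq : (claimB (nbrs adj v) (s.vis, [])).2 = []
      · rw [hq]; rfl
      · have hpos := claimB_pos_of_ne_nil (nbrs adj v) s.vis hq
        have hcnt := claimB_cnt (nbrs adj v) s.vis []
        simp only [List.length_nil, Nat.add_zero] at hcnt
        have hlen : 1 ≤ (claimB (nbrs adj v) (s.vis, [])).2.length := by
          cases hh : (claimB (nbrs adj v) (s.vis, [])).2 with
          | nil => exact absurd hh hq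
          | cons a l => simp
        apply foldl_dfsB_fuel adj f g
        · show cntF (claimB (nbrs adj v) (s.vis, [])).1 < f
          omega
        · show cntF (claimB (nbrs adj v) (s.vis, [])).1 < g
          omega
        · intro w t htf htg; exact ihf g w t htf htg
-- the stack discipline invariant: an element may repeat only if it is inert (out of range)
def Pstk (n : Nat) (a b : Int) : Prop :=
  pynorm n a = pynorm n b → ¬ (0 ≤ pynorm n a ∧ (pynorm n a).toNat < n)

theorem loopA_nil (adj : List (List Int)) (s : StA) (h : s.stk = []) : loopA adj s = s := by
  rw [loopA]
  split
  · rfl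
  · next v rest heq => rw [h] at heq; cases heq

theorem loopA_cons (adj : List (List Int)) (s : StA) (v : Int) (rest : List Int)
    (h : s.stk = v :: rest) :
    loopA adj s = loopA adj (claimA v (nbrs adj v) ⟨s.vis, s.par, s.ch, s.ord ++ [v], rest⟩) := by
  conv_lhs => rw [loopA]
  split
  · next heq => rw [h] at heq; cases heq
  · next v' rest' heq =>
      rw [h] at heq
      injection heq with h1 h2
      subst h1; subst h2
      rfl

theorem SIM (adj : List (List Int)) (f : Nat) : ∀ (m : Nat) (s : StA),
    2 * cntF s.vis + s.stk.length ≤ m →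
    cntF s.vis < f →
    s.ch.length = s.vis.length →
    (∀ w, visAt s.vis w = false → tget s.ch w = []) →
    (∀ v ∈ s.stk, visAt s.vis v = true ∧ tget s.ch v = []) →
    s.stk.Pairwise (Pstk s.vis.length) →
    ((loopA adj s).vis = (s.stk.foldl (fun b v => dfsB adj f v b) ⟨s.vis, s.ch, s.ord⟩).vis ∧
     (loopA adj s).ch = (s.stk.foldl (fun b v => dfsB adj f v b) ⟨s.vis, s.ch, s.ord⟩).ch ∧
     (loopA adj s).ord = (s.stk.foldl (fun b v => dfsB adj f v b) ⟨s.vis, s.ch, s.ord⟩).ord) := by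
  intro m
  induction m with
  | zero =>
    intro s hm _ _ _ _ _
    have hstk : s.stk = [] := List.eq_nil_of_length_eq_zero (by omega)
    rw [loopA_nil adj s hstk, hstk]
    exact ⟨rfl, rfl, rfl⟩
  | succ m ihm =>
    intro s hm hf hlen H1 H2 H3
    cases hstk : s.stk with
    | nil =>
      rw [loopA_nil adj s hstk]
      exact ⟨rfl, rfl, rfl⟩
    | cons v rest =>
      have hslen : s.stk.length = rest.length + 1 := by rw [hstk]; rfl
      obtain ⟨hvis2, hstk2, hord2⟩ :=
        claimA_proj (nbrs adj v) v ⟨s.vis, s.par, s.ch, s.ord ++ [v], rest⟩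
      have hch2 := claimA_ch (nbrs adj v) v ⟨s.vis, s.par, s.ch, s.ord ++ [v], rest⟩
      dsimp only at hvis2 hstk2 hord2 hch2
      have hhead : visAt s.vis v = true ∧ tget s.ch v = [] := by
        refine H2 v ?_
        rw [hstk]; exact List.mem_cons_self
      have hchv : tget s.ch v = [] := hhead.2
      rw [hchv, List.nil_append] at hch2
      have hcnt := claimB_cnt (nbrs adj v) s.vis []
      simp only [List.length_nil, Nat.add_zero] at hcnt
      obtain ⟨hks, hkp⟩ := claimB_kids_spec (nbrs adj v) s.vis
      -- fuel is positive
      cases f with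
      | zero => omega
      | succ fz =>
      -- facts about the claimed state s2
      have htget2 : ∀ w, visAt s.vis w = false →
          tget (claimA v (nbrs adj v) ⟨s.vis, s.par, s.ch, s.ord ++ [v], rest⟩).ch w
            = tget s.ch w := by
        intro w hw
        rw [hch2]
        obtain ⟨w0, _, _⟩ := visAt_false_elim s.vis w hw
        rw [← hlen] at w0
        by_cases hv : 0 ≤ pynorm s.ch.length v
        · refine tget_tset_other s.ch v w _ hv w0 ?_
          rintro ⟨hc, -⟩
          have hsl := pynorm_inj s.ch.length v w hv w0 hc
          rw [hlen] at hsl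
          rw [← visAt_congr s.vis v w hsl, hhead.1] at hw
          cases hw
        · rw [tset_neg _ _ _ hv]
      -- IH preconditions for s2
      have hm2 : 2 * cntF (claimA v (nbrs adj v) ⟨s.vis, s.par, s.ch, s.ord ++ [v], rest⟩).vis
          + (claimA v (nbrs adj v) ⟨s.vis, s.par, s.ch, s.ord ++ [v], rest⟩).stk.length ≤ m := by
        rw [hvis2, hstk2]
        simp only [List.length_append, List.length_reverse]
        omega
      have hf2 : cntF (claimA v (nbrs adj v) ⟨s.vis, s.par, s.ch, s.ord ++ [v], rest⟩).vis < fz + 1 := by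
        rw [hvis2]; omega
      have hlen2 : (claimA v (nbrs adj v) ⟨s.vis, s.par, s.ch, s.ord ++ [v], rest⟩).ch.length
          = (claimA v (nbrs adj v) ⟨s.vis, s.par, s.ch, s.ord ++ [v], rest⟩).vis.length := by
        rw [hvis2, hch2, tset_length, claimB_vis_length]
        exact hlen
      have H1' : ∀ w, visAt (claimA v (nbrs adj v) ⟨s.vis, s.par, s.ch, s.ord ++ [v], rest⟩).vis w = false →
          tget (claimA v (nbrs adj v) ⟨s.vis, s.par, s.ch, s.ord ++ [v], rest⟩).ch w = [] := by
        intro w hw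
        rw [hvis2] at hw
        have hw0 : visAt s.vis w = false := visAt_false_claimB _ _ _ _ hw
        rw [htget2 w hw0]
        exact H1 w hw0
      have H2' : ∀ w ∈ (claimA v (nbrs adj v) ⟨s.vis, s.par, s.ch, s.ord ++ [v], rest⟩).stk,
          visAt (claimA v (nbrs adj v) ⟨s.vis, s.par, s.ch, s.ord ++ [v], rest⟩).vis w = true ∧
          tget (claimA v (nbrs adj v) ⟨s.vis, s.par, s.ch, s.ord ++ [v], rest⟩).ch w = [] := by
        intro w hw
        rw [hstk2] at hw
        rcases List.mem_append.1 hw with hw1 | hw2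
        · have hwq := List.mem_reverse.1 hw1
          obtain ⟨w0, wlt, wfalse, wtrue⟩ := hks w hwq
          refine ⟨by rw [hvis2]; exact wtrue, ?_⟩
          rw [htget2 w wfalse]
          exact H1 w wfalse
        · have hr : visAt s.vis w = true ∧ tget s.ch w = [] := by
            refine H2 w ?_
            rw [hstk]; exact List.mem_cons_of_mem v hw2
          refine ⟨by rw [hvis2]; exact claimB_vis_mono _ _ _ _ hr.1, ?_⟩
          rw [hch2]
          by_cases hv : 0 ≤ pynorm s.ch.length v
          · by_cases w0 : 0 ≤ pynorm s.ch.length w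
            · rw [tget_tset_other s.ch v w _ hv w0 ?_]
              · exact hr.2
              · rintro ⟨hc, hvlt⟩
                have hsl := pynorm_inj s.ch.length v w hv w0 hc
                have hp : Pstk s.vis.length v w := by
                  rw [hstk] at H3
                  exact (List.pairwise_cons.1 H3).1 w hw2
                rw [hlen] at hsl hv hvlt
                exact hp hsl ⟨hv, hvlt⟩
            · rw [tget_tset_neg_w _ _ _ _ w0]
          · rw [tset_neg _ _ _ hv]
            exact hr.2
      have H3' : (claimA v (nbrs adj v) ⟨s.vis, s.par, s.ch, s.ord ++ [v], rest⟩).stk.Pairwise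
          (Pstk (claimA v (nbrs adj v) ⟨s.vis, s.par, s.ch, s.ord ++ [v], rest⟩).vis.length) := by
        rw [hstk2, hvis2, claimB_vis_length]
        rw [List.pairwise_append]
        refine ⟨?_, ?_, ?_⟩
        · rw [List.pairwise_reverse]
          exact hkp.imp (fun {a b} hab heq => absurd heq.symm hab)
        · rw [hstk] at H3
          exact (List.pairwise_cons.1 H3).2
        · intro a ha b hb heq
          exfalso
          have haq := List.mem_reverse.1 ha
          obtain ⟨a0, _, afalse, _⟩ := hks a haq
          have hrb : visAt s.vis b = true ∧ tget s.ch b = [] := by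
            refine H2 b ?_
            rw [hstk]; exact List.mem_cons_of_mem v hb
          rw [visAt_congr s.vis a b heq, hrb.1] at afalse
          cases afalse
      obtain ⟨e1, e2, e3⟩ := ihm _ hm2 hf2 hlen2 H1' H2' H3'
      -- assemble
      have hb1 : (⟨(claimA v (nbrs adj v) ⟨s.vis, s.par, s.ch, s.ord ++ [v], rest⟩).vis,
          (claimA v (nbrs adj v) ⟨s.vis, s.par, s.ch, s.ord ++ [v], rest⟩).ch,
          (claimA v (nbrs adj v) ⟨s.vis, s.par, s.ch, s.ord ++ [v], rest⟩).ord⟩ : StB)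
          = ⟨(claimB (nbrs adj v) (s.vis, [])).1,
             tset s.ch v (claimB (nbrs adj v) (s.vis, [])).2, s.ord ++ [v]⟩ := by
        rw [hvis2, hch2, hord2]
      have hfoldB : (v :: rest).foldl (fun b v => dfsB adj (fz+1) v b) ⟨s.vis, s.ch, s.ord⟩
          = (claimA v (nbrs adj v) ⟨s.vis, s.par, s.ch, s.ord ++ [v], rest⟩).stk.foldl
              (fun b v => dfsB adj (fz+1) v b)
              ⟨(claimA v (nbrs adj v) ⟨s.vis, s.par, s.ch, s.ord ++ [v], rest⟩).vis,
               (claimA v (nbrs adj v) ⟨s.vis, s.par, s.ch, s.ord ++ [v], rest⟩).ch,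
               (claimA v (nbrs adj v) ⟨s.vis, s.par, s.ch, s.ord ++ [v], rest⟩).ord⟩ := by
        rw [hb1, hstk2, List.foldl_append, List.foldl_cons]
        congr 1
        show dfsB adj (fz+1) v ⟨s.vis, s.ch, s.ord⟩ = _
        simp only [dfsB]
        by_cases hq : (claimB (nbrs adj v) (s.vis, [])).2 = []
        · rw [hq]; rfl
        · have hpos := claimB_pos_of_ne_nil (nbrs adj v) s.vis hq
          have hlen1 : 1 ≤ (claimB (nbrs adj v) (s.vis, [])).2.length := by
            cases hh : (claimB (nbrs adj v) (s.vis, [])).2 with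
            | nil => exact absurd hh hq
            | cons a l => simp
          apply foldl_dfsB_fuel adj fz (fz + 1)
          · show cntF (claimB (nbrs adj v) (s.vis, [])).1 < fz
            omega
          · show cntF (claimB (nbrs adj v) (s.vis, [])).1 < fz + 1
            omega
          · intro w t htf htg
            exact dfsB_fuel_irrel adj fz (fz + 1) w t htf htg
      rw [loopA_cons adj s v rest hstk, hfoldB]
      exact ⟨e1, e2, e3⟩
-- the two add-loops of A versus the pad-and-zip of B
theorem addInto_length : ∀ (xs c : List Int) (k : Nat), (addInto c xs k).length = c.length := by
  intro xs
  induction xs with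
  | nil => intro c k; rfl
  | cons x xs ih =>
    intro c k
    simp only [addInto]
    rw [ih, List.length_set]

theorem addInto_getD : ∀ (xs c : List Int) (k i : Nat),
    (addInto c xs k).getD i 0 = c.getD i 0 +
      (if k ≤ i ∧ i - k < xs.length ∧ i < c.length then xs.getD (i - k) 0 else 0) := by
  intro xs
  induction xs with
  | nil =>
    intro c k i
    simp [addInto]
  | cons x xs ih =>
    intro c k i
    simp only [addInto]
    rw [ih, getD_set_ite]
    simp only [List.length_set, List.length_cons]
    by_cases hki : k = i
    · subst hki
      by_cases hlt : k < c.length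
      · rw [if_pos ⟨rfl, hlt⟩]
        have h1 : ¬ (k + 1 ≤ k) := by omega
        rw [if_neg (by omega), if_pos (by omega)]
        simp
      · rw [if_neg (by omega), if_neg (by omega), if_neg (by omega)]
    · rw [if_neg (by omega)]
      by_cases hc : k + 1 ≤ i ∧ i - (k + 1) < xs.length ∧ i < c.length
      · rw [if_pos hc, if_pos (by omega)]
        have hik : i - k = (i - (k + 1)) + 1 := by omega
        rw [hik, List.getD_cons_succ]
      · rw [if_neg hc]
        by_cases hc2 : k ≤ i ∧ i - k < xs.length + 1 ∧ i < c.length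
        · exfalso
          apply hc
          refine ⟨by omega, by omega, hc2.2.2⟩
        · rw [if_neg hc2]

theorem combine_eq (ev jv : List Int) :
    addInto (addInto (List.replicate (max ev.length (jv.length + 1)) 0) ev 0) jv 1 =
      List.zipWith (· + ·) (ev ++ List.replicate (max ev.length (jv.length + 1) - ev.length) 0)
        (0 :: (jv ++ List.replicate (max ev.length (jv.length + 1) - 1 - jv.length) 0)) := by
  have hde : ev.length ≤ max ev.length (jv.length + 1) := Nat.le_max_left _ _
  have hdj : jv.length + 1 ≤ max ev.length (jv.length + 1) := Nat.le_max_right _ _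
  have hlenL : (addInto (addInto (List.replicate (max ev.length (jv.length + 1)) 0) ev 0) jv 1).length
      = max ev.length (jv.length + 1) := by
    rw [addInto_length, addInto_length, List.length_replicate]
  have hlenR : (List.zipWith (· + ·) (ev ++ List.replicate (max ev.length (jv.length + 1) - ev.length) 0)
      (0 :: (jv ++ List.replicate (max ev.length (jv.length + 1) - 1 - jv.length) 0))).length
      = max ev.length (jv.length + 1) := by
    rw [List.length_zipWith]
    simp only [List.length_append, List.length_replicate, List.length_cons]
    omega
  apply List.ext_getElem (by rw [hlenL, hlenR])
  intro i h1 h2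
  rw [hlenL] at h1
  rw [← List.getD_eq_getElem _ 0 (by rw [hlenL]; exact h1),
      ← List.getD_eq_getElem _ 0 (by rw [hlenR]; exact h1)]
  rw [addInto_getD, addInto_getD]
  simp only [addInto_length, List.length_replicate]
  have hrep : (List.replicate (max ev.length (jv.length + 1)) (0 : Int)).getD i 0 = 0 :=
    List.getD_replicate _ h1
  rw [hrep]
  -- right side pointwise
  have hzip : (List.zipWith (· + ·) (ev ++ List.replicate (max ev.length (jv.length + 1) - ev.length) 0)
      (0 :: (jv ++ List.replicate (max ev.length (jv.length + 1) - 1 - jv.length) 0))).getD i 0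
      = (ev ++ List.replicate (max ev.length (jv.length + 1) - ev.length) 0).getD i 0 +
        (0 :: (jv ++ List.replicate (max ev.length (jv.length + 1) - 1 - jv.length) 0)).getD i 0 := by
    rw [List.getD_eq_getElem _ 0 (by rw [hlenR]; exact h1)]
    rw [List.getElem_zipWith]
    rw [List.getD_eq_getElem _ 0 (by simp only [List.length_append, List.length_replicate]; omega),
        List.getD_eq_getElem _ 0 (by simp only [List.length_cons, List.length_append, List.length_replicate]; omega)]
  rw [hzip]
  -- evaluate the two padded reads
  have hev : (ev ++ List.replicate (max ev.length (jv.length + 1) - ev.length) 0).getD i 0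
      = (if i < ev.length then ev.getD i 0 else 0) := by
    by_cases hi : i < ev.length
    · rw [if_pos hi, List.getD_append _ _ _ _ hi]
    · rw [if_neg hi]
      rw [List.getD_append_right _ _ _ _ (Nat.le_of_not_lt hi)]
      by_cases hvalid : i - ev.length < max ev.length (jv.length + 1) - ev.length
      · exact List.getD_replicate _ hvalid
      · exact List.getD_eq_default _ _ (by simpa using Nat.le_of_not_lt hvalid)
  have hjv : (0 :: (jv ++ List.replicate (max ev.length (jv.length + 1) - 1 - jv.length) 0)).getD i 0
      = (if 1 ≤ i ∧ i - 1 < jv.length then jv.getD (i - 1) 0 else 0) := by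
    cases i with
    | zero => simp
    | succ j =>
      rw [List.getD_cons_succ]
      by_cases hj : j < jv.length
      · rw [if_pos (by omega), List.getD_append _ _ _ _ hj]
        congr 1
      · rw [if_neg (by omega)]
        rw [List.getD_append_right _ _ _ _ (Nat.le_of_not_lt hj)]
        by_cases hvalid : j - jv.length < max ev.length (jv.length + 1) - 1 - jv.length
        · exact List.getD_replicate _ hvalid
        · exact List.getD_eq_default _ _ (by simpa using Nat.le_of_not_lt hvalid)
  rw [hev, hjv]
  by_cases he : i < ev.length <;> by_cases hjc : 1 ≤ i ∧ i - 1 < jv.length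
  · rw [if_pos he, if_pos hjc, if_pos ⟨by omega, by omega, by omega⟩,
        if_pos ⟨by omega, by omega, by omega⟩]
    simp only [Nat.sub_zero]
    ring
  · rw [if_pos he, if_neg hjc, if_pos ⟨by omega, by omega, by omega⟩, if_neg (by omega)]
    simp only [Nat.sub_zero]
    ring
  · rw [if_neg he, if_pos hjc, if_neg (by omega), if_pos ⟨by omega, by omega, by omega⟩]
    ring
  · rw [if_neg he, if_neg hjc, if_neg (by omega), if_neg (by omega)]
    ring

theorem step2_eq (ch : List (List Int)) (t : List (List Int) × List (List Int) × List (List Int))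
    (v : Int) : step2A ch t v = step2B ch t v := by
  unfold step2A step2B
  by_cases h : tget ch v = []
  · rw [if_pos h, if_pos h]
  · rw [if_neg h, if_neg h]
    dsimp only
    rw [combine_eq]

theorem ports_eq (adj : List (List Int)) (root : Int) :
    tree_dp adj root = tree_dp_alt adj root := by
  simp only [tree_dp, tree_dp_alt]
  have hcnt : cntF (bset (List.replicate adj.length false) root) < adj.length + 1 := by
    have h1 : cntF (bset (List.replicate adj.length false) root)
        ≤ (bset (List.replicate adj.length false) root).length := List.count_le_length
    rw [bset_length, List.length_replicate] at h1
    omega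
  obtain ⟨e1, e2, e3⟩ := SIM adj (adj.length + 1)
      (2 * cntF (bset (List.replicate adj.length false) root) + 1)
      ⟨bset (List.replicate adj.length false) root, List.replicate adj.length (-1),
       List.replicate adj.length [], [], [root]⟩
      (by simp)
      hcnt
      (by show (List.replicate adj.length ([] : List Int)).length = _
          rw [bset_length]; simp)
      (by intro w hw; exact tget_replicate _ _)
      (by
        intro w hw
        have hw' : w ∈ [root] := hw
        rw [List.mem_singleton] at hw'
        subst hw'
        refine ⟨?_, tget_replicate _ _⟩
        show visAt (bset (List.replicate adj.length false) w) w = true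
        by_cases h0 : 0 ≤ pynorm (List.replicate adj.length false : List Bool).length w
        · by_cases hlt : (pynorm (List.replicate adj.length false : List Bool).length w).toNat
              < (List.replicate adj.length false : List Bool).length
          · exact visAt_bset_self _ _ h0 hlt
          · apply visAt_out
            rw [bset_length]
            exact hlt
        · unfold visAt bset
          rw [if_neg h0, if_neg h0])
      (List.pairwise_singleton _ _)
  simp only [List.foldl_cons, List.foldl_nil] at e1 e2 e3
  rw [e2, e3]
  have hstep : step2A (dfsB adj (adj.length + 1) root
      ⟨bset (List.replicate adj.length false) root, List.replicate adj.length [], []⟩).ch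
      = step2B (dfsB adj (adj.length + 1) root
      ⟨bset (List.replicate adj.length false) root, List.replicate adj.length [], []⟩).ch := by
    funext t v
    exact step2_eq _ t v
  rw [hstep]

-- ===== VERDICT (by name: the statement is the Claim_ definition above) =====
theorem tree_dp_spec : Claim_equal_tree_dp := by
  intro adj root _ _
  unfold Spec_tree_dp
  exact ports_eq adj root
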